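-- pv_equiv track=rewrite | github.com/ikokkari/PythonProblems | labs109.py | collapse_intervals
-- ===== SOURCE A (Python) =====
-- def collapse_intervals(items):
--     if not items:
--         return ''
--     result, consec, first = '', [], True
--     for item in items:
--         if consec == [] or item == consec[-1] + 1:
--             consec.append(item)
--         else:
--             result += __encode_interval(consec, first)
--             first = False
--             consec = [item]
--     result += __encode_interval(consec, first)
--     return result
--
-- def __encode_interval(curr, first):
--     result = '' if first else ','
--     if len(curr) > 1:
--         result += f"{curr[0]}-{curr[-1]}"
--     else:
--         result += str(curr[0])
--     return result
-- ===== SOURCE B (Python) =====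
-- def collapse_intervals(items):
--     # Boundary flags: element i starts a run iff items[i] != items[i-1]+1, ends one iff items[i+1] != items[i]+1.
--     starts = [True] + [b != a + 1 for a, b in zip(items, items[1:])]
--     ends = starts[1:] + [True]
--     toks = []
--     for x, s, e in zip(items, starts, ends):
--         if s:
--             toks.append(("" if not toks else ",") + str(x))
--         elif e:
--             toks.append("-" + str(x))
--     return ''.join(toks)
-- ===== Notes on version B (the rewrite author's own statement) =====
-- stated objective: alternative
-- what changed: Replaces the stateful run-accumulator with a flushing formatter by a stateless boundary computation: two shifted boolean vectors (run-start and run-end flags from pairwise zips), then each element emits its own token (start emits the number, a bare run-end emits '-last', middles emit nothing) and a single join.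
import Mathlib
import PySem

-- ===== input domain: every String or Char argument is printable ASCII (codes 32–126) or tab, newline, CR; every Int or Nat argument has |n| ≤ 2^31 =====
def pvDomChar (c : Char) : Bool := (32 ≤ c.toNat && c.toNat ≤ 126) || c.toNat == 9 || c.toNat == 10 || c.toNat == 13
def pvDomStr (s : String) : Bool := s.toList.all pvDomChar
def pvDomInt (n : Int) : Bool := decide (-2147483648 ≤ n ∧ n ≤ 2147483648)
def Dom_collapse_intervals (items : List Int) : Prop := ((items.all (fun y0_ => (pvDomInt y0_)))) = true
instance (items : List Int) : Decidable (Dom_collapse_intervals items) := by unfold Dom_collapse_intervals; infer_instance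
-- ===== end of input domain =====

-- B replaces A's stateful run-accumulator by precomputed start/end boundary-flag vectors
-- with a per-element token emission and one join; same output, same O(n) cost.

-- ===== PORT A =====
-- port of __encode_interval
def pvEncodeInterval (curr : List Int) (first : Bool) : String :=
  (if first then "" else ",") ++
    (if curr.length > 1
     then PySem.Int.toStr curr.headI ++ "-" ++ PySem.Int.toStr curr.getLastI
     else PySem.Int.toStr curr.headI)

-- the body of A's for-loop (state: result, consec, first)
def pvStepA (st : String × List Int × Bool) (item : Int) : String × List Int × Bool :=
  if st.2.1 = [] ∨ item = st.2.1.getLastI + 1 then (st.1, st.2.1 ++ [item], st.2.2)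
  else (st.1 ++ pvEncodeInterval st.2.1 st.2.2, [item], false)

def collapse_intervals (items : List Int) : String :=
  if items = [] then ""
  else
    let st := items.foldl pvStepA ("", [], true)
    st.1 ++ pvEncodeInterval st.2.1 st.2.2

-- ===== PORT B =====
-- body of B's loop over zip(items, starts, ends): start token / lone end token / nothing
def pvStepTok (toks : List String) (t : Int × Bool × Bool) : List String :=
  if t.2.1 then toks ++ [(if toks = [] then "" else ",") ++ PySem.Int.toStr t.1]
  else if t.2.2 then toks ++ ["-" ++ PySem.Int.toStr t.1]
  else toks

def collapse_intervals_alt (items : List Int) : String :=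
  -- starts = [True] + [b != a + 1 for a, b in zip(items, items[1:])]
  let starts : List Bool :=
    true :: ((items.zip (PySem.List.slice items (some 1) none)).map (fun p => p.2 != p.1 + 1))
  -- ends = starts[1:] + [True]
  let ends : List Bool := PySem.List.slice starts (some 1) none ++ [true]
  PySem.Str.join "" ((items.zip (starts.zip ends)).foldl pvStepTok [])

-- ===== PRECONDITION & SPEC =====
def Spec_collapse_intervals (items : List Int) (out : String) : Prop := out = collapse_intervals_alt items
instance (items : List Int) (out : String) : Decidable (Spec_collapse_intervals items out) := by unfold Spec_collapse_intervals; infer_instance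

-- ===== CLAIM (what is proved, stated in full; the proofs are below) =====
def Claim_equal_collapse_intervals : Prop := ∀ (items : List Int), Dom_collapse_intervals items → Spec_collapse_intervals items (collapse_intervals items)

-- ===== LEMMAS AND PROOFS =====

theorem chars_join_snoc (sep : List Char) (xs : List (List Char)) (y : List Char) :
    PySem.Chars.join sep (xs ++ [y]) =
      (if xs = [] then [] else PySem.Chars.join sep xs ++ sep) ++ y := by
  induction xs with
  | nil => simp [PySem.Chars.join_singleton]
  | cons a t ih =>
    cases t with
    | nil => simp [PySem.Chars.join_cons_cons, PySem.Chars.join_singleton]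
    | cons b u =>
      simp only [List.cons_append] at ih ⊢
      rw [PySem.Chars.join_cons_cons, ih]
      rw [PySem.Chars.join_cons_cons]
      simp [List.append_assoc]

theorem join0_nil : PySem.Str.join "" ([] : List String) = "" := by
  simp [PySem.Str.join, PySem.Chars.join, List.intercalate]

theorem chars_join0_snoc (xs : List (List Char)) (y : List Char) :
    PySem.Chars.join [] (xs ++ [y]) = PySem.Chars.join [] xs ++ y := by
  rw [chars_join_snoc]
  split_ifs with h
  · subst h
    simp [PySem.Chars.join_nil]
  · simp

theorem join0_snoc (xs : List String) (y : String) :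
    PySem.Str.join "" (xs ++ [y]) = PySem.Str.join "" xs ++ y := by
  have hl : (PySem.Str.join "" (xs ++ [y])).toList = (PySem.Str.join "" xs ++ y).toList := by
    simp only [PySem.Str.toList_join, List.map_append, List.map_cons, List.map_nil]
    simpa using chars_join0_snoc (xs.map String.toList) y.toList
  calc PySem.Str.join "" (xs ++ [y])
      = String.ofList (PySem.Str.join "" (xs ++ [y])).toList := by rw [String.ofList_toList]
    _ = _ := by rw [hl, String.ofList_toList]

theorem join0_singleton (y : String) : PySem.Str.join "" [y] = y := by
  have := join0_snoc [] y
  simpa [join0_nil] using this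

theorem pv_headI_append (l l' : List Int) (h : l ≠ []) : (l ++ l').headI = l.headI := by
  cases l with
  | nil => exact absurd rfl h
  | cons a t => rfl

theorem getLastI_concat {α : Type} [Inhabited α] (l : List α) (a : α) :
    (l ++ [a]).getLastI = a := by
  simp [List.getLastI_eq_getLast?_getD]

-- end-flag of an element given the list that follows it
def pvEflag (x : Int) : List Int → Bool
  | [] => true
  | y :: _ => y != x + 1

-- the triple stream B's zip produces, as a structural recursion (flag b = start flag of the head)
def pvTrips (b : Bool) : List Int → List (Int × Bool × Bool)
  | [] => []
  | x :: t => (x, b, pvEflag x t) :: pvTrips (pvEflag x t) t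

theorem pvTrips_eq (l : List Int) (b : Bool) :
    l.zip ((b :: (l.zip l.tail).map (fun p => p.2 != p.1 + 1)).zip
           ((l.zip l.tail).map (fun p => p.2 != p.1 + 1) ++ [true])) = pvTrips b l := by
  induction l generalizing b with
  | nil => rfl
  | cons x t ih =>
    cases t with
    | nil => rfl
    | cons y u =>
      simp only [List.tail_cons, List.zip_cons_cons, List.map_cons, List.cons_append]
      rw [pvTrips]
      simp only [pvEflag, List.cons.injEq]
      exact ⟨by trivial, by simpa using ih _⟩

-- main invariant: mid-run states of the two loops produce the same final string
theorem pv_main (n : Nat) : ∀ (t : List Int), t.length ≤ n →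
    ∀ (c : List Int) (res : String) (f : Bool) (toks : List String) (b : Bool),
    c ≠ [] → toks ≠ [] →
    PySem.Str.join "" toks = res ++ (if f then "" else ",") ++ PySem.Int.toStr c.headI →
    (∀ (y : Int) (t' : List Int), t = y :: t' → b = (y != c.getLastI + 1)) →
    (1 < c.length → ∃ (y : Int) (t' : List Int), t = y :: t' ∧ y = c.getLastI + 1) →
    PySem.Str.join "" ((pvTrips b t).foldl pvStepTok toks) =
      (t.foldl pvStepA (res, c, f)).1 ++
        pvEncodeInterval (t.foldl pvStepA (res, c, f)).2.1 (t.foldl pvStepA (res, c, f)).2.2 := by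
  induction n with
  | zero =>
    intro t ht c res f toks b hc htoks hinv _ hc2
    have hte : t = [] := List.eq_nil_of_length_eq_zero (Nat.le_zero.mp ht)
    subst hte
    have hlen : c.length = 1 := by
      rcases Nat.lt_or_ge 1 c.length with h | h
      · obtain ⟨_, _, h', _⟩ := hc2 h; exact absurd h' (by simp)
      · have : c.length ≠ 0 := by simpa using hc
        omega
    simp only [pvTrips, List.foldl_nil, pvEncodeInterval, hlen]
    simpa [String.append_assoc] using hinv
  | succ n ih =>
    intro t ht c res f toks b hc htoks hinv hb hc2
    cases t with
    | nil =>
      have hlen : c.length = 1 := by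
        rcases Nat.lt_or_ge 1 c.length with h | h
        · obtain ⟨_, _, h', _⟩ := hc2 h; exact absurd h' (by simp)
        · have : c.length ≠ 0 := by simpa using hc
          omega
      simp only [pvTrips, List.foldl_nil, pvEncodeInterval, hlen]
      simpa [String.append_assoc] using hinv
    | cons x t' =>
      have hbx : b = (x != c.getLastI + 1) := hb x t' rfl
      rw [pvTrips]
      simp only [List.foldl_cons]
      by_cases hx : x = c.getLastI + 1
      · -- x continues the current run
        have hsA : pvStepA (res, c, f) x = (res, c ++ [x], f) := by simp [pvStepA, hx]
        have hsB : pvStepTok toks (x, b, pvEflag x t') =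
            if pvEflag x t' then toks ++ ["-" ++ PySem.Int.toStr x] else toks := by
          simp [pvStepTok, hbx, hx]
        rw [hsA, hsB]
        rcases he : pvEflag x t' with _ | _
        · -- run continues further: t' = y :: u with y = x + 1
          obtain ⟨y, u, hty, hyx⟩ : ∃ y u, t' = y :: u ∧ y = x + 1 := by
            cases t' with
            | nil => simp [pvEflag] at he
            | cons y u =>
              refine ⟨y, u, rfl, ?_⟩
              simpa [pvEflag] using he
          rw [if_neg (by simp)]
          refine ih t' (by simpa using Nat.le_of_succ_le_succ ht) (c ++ [x]) res f toks
            false (by simp) htoks ?_ ?_ ?_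
          · simpa [pv_headI_append, hc] using hinv
          · intro z t'' hz
            subst hz
            rw [getLastI_concat]
            simpa [pvEflag] using he.symm
          · intro _
            exact ⟨y, u, hty, by rw [hyx, getLastI_concat]⟩
        · -- run ends at x: "-x" is emitted; the next element (if any) starts a new run
          rw [if_pos rfl]
          have hinv1 : PySem.Str.join "" (toks ++ ["-" ++ PySem.Int.toStr x]) =
              res ++ (if f then "" else ",") ++ PySem.Int.toStr c.headI ++
                ("-" ++ PySem.Int.toStr x) := by
            rw [join0_snoc, hinv]
          cases t' with
          | nil =>
            simp only [pvTrips, List.foldl_nil]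
            rw [hinv1]
            have hc0 : 0 < c.length := List.length_pos_of_ne_nil hc
            simp [pvEncodeInterval, hc0, pv_headI_append, hc,
              getLastI_concat, String.append_assoc]
          | cons y u =>
            have hyx : y ≠ x + 1 := by simpa [pvEflag] using he
            rw [pvTrips]
            simp only [List.foldl_cons]
            have hsA2 : pvStepA (res, c ++ [x], f) y =
                (res ++ pvEncodeInterval (c ++ [x]) f, [y], false) := by
              simp [pvStepA, getLastI_concat, hyx]
            have hsB2 : pvStepTok (toks ++ ["-" ++ PySem.Int.toStr x]) (y, true, pvEflag y u) =
                (toks ++ ["-" ++ PySem.Int.toStr x]) ++ [ "," ++ PySem.Int.toStr y] := by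
              simp [pvStepTok]
            rw [hsA2, hsB2]
            refine ih u (by simp at ht ⊢; omega) [y] (res ++ pvEncodeInterval (c ++ [x]) f)
              false ((toks ++ ["-" ++ PySem.Int.toStr x]) ++ [ "," ++ PySem.Int.toStr y])
              (pvEflag y u) (by simp) (by simp) ?_ ?_ (by simp)
            · rw [join0_snoc, hinv1]
              have hc0 : 0 < c.length := List.length_pos_of_ne_nil hc
              simp [pvEncodeInterval, hc0, pv_headI_append, hc,
                getLastI_concat, String.append_assoc]
            · intro z t'' hz
              subst hz
              have h1 : [y].getLastI = y := getLastI_concat [] y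
              simp [pvEflag, h1]
      · -- x starts a new run: A flushes, B emits "," ++ str x
        have hlen : c.length = 1 := by
          rcases Nat.lt_or_ge 1 c.length with h | h
          · obtain ⟨y, u, h', hy⟩ := hc2 h
            rw [List.cons.injEq] at h'
            exact absurd (by rw [h'.1]; exact hy) hx
          · have : c.length ≠ 0 := by simpa using hc
            omega
        have hsA : pvStepA (res, c, f) x = (res ++ pvEncodeInterval c f, [x], false) := by
          simp [pvStepA, hx, hc]
        have hsB : pvStepTok toks (x, b, pvEflag x t') =
            toks ++ [ "," ++ PySem.Int.toStr x] := by
          simp [pvStepTok, hbx, hx, htoks]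
        rw [hsA, hsB]
        refine ih t' (by simpa using Nat.le_of_succ_le_succ ht) [x]
          (res ++ pvEncodeInterval c f) false (toks ++ [ "," ++ PySem.Int.toStr x])
          (pvEflag x t') (by simp) (by simp) ?_ ?_ (by simp)
        · rw [join0_snoc, hinv]
          simp [pvEncodeInterval, hlen, String.append_assoc]
        · intro z t'' hz
          subst hz
          have h1 : [x].getLastI = x := getLastI_concat [] x
          simp [pvEflag, h1]

-- ===== VERDICT (by name: the statement is the Claim_ definition above) =====
theorem collapse_intervals_spec : Claim_equal_collapse_intervals := by
  intro items _
  unfold Spec_collapse_intervals collapse_intervals collapse_intervals_alt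
  simp only [PySem.List.slice_from_one, List.tail_cons]
  rw [pvTrips_eq]
  cases items with
  | nil => simp [pvTrips, join0_nil]
  | cons x t =>
    simp only [List.foldl_cons]
    rw [pvTrips]
    simp only [List.foldl_cons]
    have h0A : pvStepA ("", [], true) x = ("", [x], true) := by simp [pvStepA]
    have h0B : pvStepTok [] (x, true, pvEflag x t) = ["" ++ PySem.Int.toStr x] := by
      simp [pvStepTok]
    rw [h0A, h0B]
    refine (pv_main t.length t le_rfl [x] "" true ["" ++ PySem.Int.toStr x]
      (pvEflag x t) (by simp) (by simp) ?_ ?_ (by simp)).symm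
    · rw [join0_singleton]
      simp
    · intro z t'' hz
      subst hz
      have h1 : [x].getLastI = x := getLastI_concat [] x
      simp [pvEflag, h1]
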